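-- pv_equiv track=rewrite | github.com/portfedh/100Devs | Resources/FooBar Challenge/Answer3.py | solution
-- ===== SOURCE A (Python) =====
-- def solution(matchBombsNeeded, faculaBombsNeeded):
--
--     # Set input as an integer
--     matchBomb = int(matchBombsNeeded)
--     faculaBomb = int(faculaBombsNeeded)
--
--     # Keep track of generations
--     generationsNeeded = 0
--
--     # Start inverse replication loop
--     while True:
--         # Case: End of loop --> Ok
--         # If matchBomb and faculaBomb are equal to 1
--         # We are at the start of the the loop.
--         # Return the number of generation passed as a string
--         if matchBomb == 1 and faculaBomb == 1:
--             return str(generationsNeeded)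
--
--         # Case: End of loop --> Impossible
--         elif matchBomb <= 0 or faculaBomb <= 0:
--             return "impossible"
--
--         # Case: Inverse replication loop
--         # Check which bomb is larger
--         # Make inverse replication
--         # Increment the generation counter
--         else:
--             if matchBomb > faculaBomb:
--                 # If the difference is more than 5x,
--                 # Calculate a multiplication factor
--                 # And increase generations by result
--                 if matchBomb > (5 * faculaBomb):
--                     multiplicationFactor = (int(matchBomb / faculaBomb) -1)
--                     generationsNeeded += multiplicationFactor
--                     matchBomb = matchBomb - (multiplicationFactor * faculaBomb)
--                 else:
--                     matchBomb -= faculaBomb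
--                     generationsNeeded += 1
--             else:
--                 if faculaBomb > (5 * matchBomb):
--                     multiplicationFactor = (int(faculaBomb / matchBomb) -1)
--                     generationsNeeded += multiplicationFactor
--                     faculaBomb = faculaBomb - (multiplicationFactor * matchBomb)
--                 else:
--                     faculaBomb -= matchBomb
--                     generationsNeeded += 1
-- ===== SOURCE B (Python) =====
-- def solution(matchBombsNeeded, faculaBombsNeeded):
--     # Division-free doubling reduction: keep the pair swap-normalized and
--     # subtract the largest power-of-two multiple of the smaller value from the
--     # larger (found by repeated doubling), counting that power of two as
--     # generations; when the smaller value is 1 the tail count is closed-form.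
--     m = int(matchBombsNeeded)
--     f = int(faculaBombsNeeded)
--     gens = 0
--     while m > 0 and f > 0 and m != f:
--         if m < f:
--             m, f = f, m
--         if f == 1:
--             return str(gens + m - 1)
--         step, k = f, 1
--         while step * 2 <= m:
--             step *= 2
--             k *= 2
--         m -= step
--         gens += k
--     return str(gens) if (m == 1 and f == 1) else "impossible"
-- ===== Notes on version B (the rewrite author's own statement) =====
-- stated objective: alternative
-- what changed: Replaces A's subtraction loop with 5x-division batching by a division-free doubling reduction: the pair is swap-normalized, the largest power-of-two multiple of the smaller value (found by repeated doubling) is subtracted from the larger while that power is added to the counter, and once the smaller value is 1 the remaining count is returned in closed form.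
import Mathlib
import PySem

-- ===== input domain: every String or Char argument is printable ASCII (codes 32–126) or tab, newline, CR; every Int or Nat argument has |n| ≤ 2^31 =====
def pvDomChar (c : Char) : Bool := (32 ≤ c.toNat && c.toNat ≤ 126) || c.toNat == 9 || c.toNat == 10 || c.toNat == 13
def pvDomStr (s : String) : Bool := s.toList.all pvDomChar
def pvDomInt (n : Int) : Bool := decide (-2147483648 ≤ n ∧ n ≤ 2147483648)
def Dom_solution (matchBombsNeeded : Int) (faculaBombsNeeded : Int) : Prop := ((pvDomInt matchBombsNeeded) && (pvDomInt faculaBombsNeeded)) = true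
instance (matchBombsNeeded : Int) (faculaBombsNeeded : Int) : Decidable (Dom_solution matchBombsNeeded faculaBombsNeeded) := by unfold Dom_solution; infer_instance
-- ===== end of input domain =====

-- B replaces A's subtraction-with-5x-division-batching state machine by a
-- division-free doubling reduction with a closed-form tail (alternative
-- decomposition; similar cost).

-- Termination lemmas for the loops below (cited by name in decreasing_by).
theorem pvDecBatch (m f : Int) (h2 : ¬ (m ≤ 0 ∨ f ≤ 0)) (h4 : m > 5 * f) :
    (m - (PySem.Int.floordiv m f - 1) * f + f).toNat < (m + f).toNat := by
  rw [Int.toNat_lt_toNat (by omega : (0:ℤ) < m + f)]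
  have hid := PySem.Int.floordiv_mul_add_mod m f
  have hr := PySem.Int.mod_nonneg m (show (0:ℤ) < f by omega)
  have hr2 := PySem.Int.mod_lt m (show (0:ℤ) < f by omega)
  rw [sub_mul, one_mul]
  omega

theorem pvDecBatch' (m f : Int) (h2 : ¬ (m ≤ 0 ∨ f ≤ 0)) (h4 : f > 5 * m) :
    (m + (f - (PySem.Int.floordiv f m - 1) * m)).toNat < (m + f).toNat := by
  rw [Int.toNat_lt_toNat (by omega : (0:ℤ) < m + f)]
  have hid := PySem.Int.floordiv_mul_add_mod f m
  have hr := PySem.Int.mod_nonneg f (show (0:ℤ) < m by omega)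
  have hr2 := PySem.Int.mod_lt f (show (0:ℤ) < m by omega)
  rw [sub_mul, one_mul]
  omega

theorem pvDecSub (m f : Int) (h2 : ¬ (m ≤ 0 ∨ f ≤ 0)) :
    (m - f + f).toNat < (m + f).toNat := by
  rw [Int.toNat_lt_toNat (by omega : (0:ℤ) < m + f)]; omega

theorem pvDecSub' (m f : Int) (h2 : ¬ (m ≤ 0 ∨ f ≤ 0)) :
    (m + (f - m)).toNat < (m + f).toNat := by
  rw [Int.toNat_lt_toNat (by omega : (0:ℤ) < m + f)]; omega

-- ===== PORT A =====
-- A's 'while True' loop, state (generationsNeeded, matchBomb, faculaBomb).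
-- Python's 'int(matchBomb / faculaBomb)' (true division truncated) is exact as
-- floor division here: both operands are positive and ≤ 2^31 on Dom, so the
-- float quotient never rounds across an integer boundary.
def solutionLoop (g m f : Int) : String :=
  if m = 1 ∧ f = 1 then PySem.Int.toStr g
  else if m ≤ 0 ∨ f ≤ 0 then "impossible"
  else if m > f then
    if m > 5 * f then
      -- multiplicationFactor = int(matchBomb / faculaBomb) - 1
      solutionLoop (g + (PySem.Int.floordiv m f - 1)) (m - (PySem.Int.floordiv m f - 1) * f) f
    else solutionLoop (g + 1) (m - f) f
  else
    if f > 5 * m then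
      solutionLoop (g + (PySem.Int.floordiv f m - 1)) m (f - (PySem.Int.floordiv f m - 1) * m)
    else solutionLoop (g + 1) m (f - m)
termination_by (m + f).toNat
decreasing_by
  · exact pvDecBatch m f (by assumption) (by assumption)
  · exact pvDecSub m f (by assumption)
  · exact pvDecBatch' m f (by assumption) (by assumption)
  · exact pvDecSub' m f (by assumption)

-- int() on an int argument is the identity
def solution (matchBombsNeeded : Int) (faculaBombsNeeded : Int) : String :=
  solutionLoop 0 matchBombsNeeded faculaBombsNeeded

-- ===== PORT B =====
-- B's inner 'while step * 2 <= m' doubling loop, state (step, k).  The '1 ≤ step'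
-- conjunct is a totality guard only: every call from solutionAltLoop has step ≥ 2.
def growStep (m step k : Int) : Int × Int :=
  if 1 ≤ step ∧ step * 2 ≤ m then growStep m (step * 2) (k * 2) else (step, k)
termination_by (m - step).toNat
decreasing_by rw [Int.toNat_lt_toNat (by omega)]; omega

-- the outer loop's termination measure, cited by name in decreasing_by:
-- the doubling loop's result stays positive, so the batch subtraction shrinks m + f
theorem growStep_pos (m step k : Int) (h : 1 ≤ step) : 1 ≤ (growStep m step k).1 := by
  rw [growStep]
  split_ifs with hg
  · exact growStep_pos m (step * 2) (k * 2) (by omega)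
  · exact h
termination_by (m - step).toNat
decreasing_by rw [Int.toNat_lt_toNat (by omega)]; omega

theorem pvDecAlt (m f : Int) (h : m > 0 ∧ f > 0 ∧ m ≠ f) :
    ((if m < f then f else m) - (growStep (if m < f then f else m) (if m < f then m else f) 1).1
        + (if m < f then m else f)).toNat < (m + f).toNat := by
  rw [Int.toNat_lt_toNat (by omega : (0:ℤ) < m + f)]
  have hp := growStep_pos (if m < f then f else m) (if m < f then m else f) 1
    (by split_ifs <;> omega)
  by_cases hlt : m < f
  · simp only [if_pos hlt] at hp ⊢
    omega
  · simp only [if_neg hlt] at hp ⊢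
    omega

def solutionAltLoop (g m f : Int) : String :=
  if h : m > 0 ∧ f > 0 ∧ m ≠ f then
    let M := if m < f then f else m
    let F := if m < f then m else f
    if F = 1 then PySem.Int.toStr (g + M - 1)
    else solutionAltLoop (g + (growStep M F 1).2) (M - (growStep M F 1).1) F
  else if m = 1 ∧ f = 1 then PySem.Int.toStr g
  else "impossible"
termination_by (m + f).toNat
decreasing_by
  exact pvDecAlt m f (by assumption)

def solution_alt (matchBombsNeeded : Int) (faculaBombsNeeded : Int) : String :=
  solutionAltLoop 0 matchBombsNeeded faculaBombsNeeded

-- ===== PRECONDITION & SPEC =====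
def Spec_solution (matchBombsNeeded : Int) (faculaBombsNeeded : Int) (out : String) : Prop := out = solution_alt matchBombsNeeded faculaBombsNeeded
instance (matchBombsNeeded : Int) (faculaBombsNeeded : Int) (out : String) : Decidable (Spec_solution matchBombsNeeded faculaBombsNeeded out) := by unfold Spec_solution; infer_instance

-- ===== CLAIM (what is proved, stated in full; the proofs are below) =====
def Claim_equal_solution : Prop := ∀ (matchBombsNeeded : Int) (faculaBombsNeeded : Int), Dom_solution matchBombsNeeded faculaBombsNeeded → Spec_solution matchBombsNeeded faculaBombsNeeded (solution matchBombsNeeded faculaBombsNeeded)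

-- ===== LEMMAS AND PROOFS =====

-- bounds of the doubling loop:
-- the doubled step stays a multiple of the original F and within m
theorem growStep_bounds (m step k F : Int) (h1 : 1 ≤ step) (h2 : step ≤ m) (hk : 1 ≤ k)
    (hF : step = k * F) :
    step ≤ (growStep m step k).1 ∧ (growStep m step k).1 ≤ m ∧
      1 ≤ (growStep m step k).2 ∧ (growStep m step k).1 = (growStep m step k).2 * F := by
  rw [growStep]
  split_ifs with h
  · have hstep2 : step * 2 = k * 2 * F := by rw [hF]; exact mul_right_comm k F 2
    have ih := growStep_bounds m (step * 2) (k * 2) F (by omega) h.2 (by omega) hstep2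
    have i1 := ih.1
    exact ⟨by omega, ih.2.1, ih.2.2.1, ih.2.2.2⟩
  · exact ⟨le_refl _, h2, hk, hF⟩
termination_by (m - step).toNat
decreasing_by rw [Int.toNat_lt_toNat (by omega)]; omega

-- B's outer 'while m > 0 and f > 0 and m != f' loop; the swap 'm, f = f, m' is
-- the two let-bindings M, F.
-- Reference: the plain one-subtraction-at-a-time loop; both ports equal it.
def subLoop (g m f : Int) : String :=
  if m = 1 ∧ f = 1 then PySem.Int.toStr g
  else if m ≤ 0 ∨ f ≤ 0 then "impossible"
  else if m > f then subLoop (g + 1) (m - f) f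
  else subLoop (g + 1) m (f - m)
termination_by (m + f).toNat
decreasing_by
  · exact pvDecSub m f (by assumption)
  · exact pvDecSub' m f (by assumption)

theorem subLoop_swap (g m f : Int) : subLoop g m f = subLoop g f m := by
  conv_lhs => rw [subLoop]
  conv_rhs => rw [subLoop]
  by_cases h1 : m = 1 ∧ f = 1
  · rw [if_pos h1, if_pos ⟨h1.2, h1.1⟩]
  · rw [if_neg h1, if_neg (show ¬ (f = 1 ∧ m = 1) from fun h => h1 ⟨h.2, h.1⟩)]
    by_cases h2 : m ≤ 0 ∨ f ≤ 0
    · rw [if_pos h2, if_pos (show f ≤ 0 ∨ m ≤ 0 from Or.symm h2)]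
    · rw [if_neg h2, if_neg (show ¬ (f ≤ 0 ∨ m ≤ 0) from fun h => h2 (Or.symm h))]
      rcases lt_trichotomy m f with h3 | h3 | h3
      · rw [if_neg (by omega), if_pos (by omega)]
        exact subLoop_swap (g + 1) m (f - m)
      · subst h3; rw [if_neg (show ¬ m > m by omega)]
      · rw [if_pos (by omega), if_neg (by omega)]
        exact subLoop_swap (g + 1) (m - f) f
termination_by (m + f).toNat
decreasing_by
  · omega
  · omega

-- k batched subtractions of f from m
theorem subLoop_batch (k : Nat) (g m f : Int) (hf : 1 ≤ f) (hk : (k : Int) * f < m) :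
    subLoop g m f = subLoop (g + k) (m - k * f) f := by
  induction k generalizing g m with
  | zero => simp
  | succ n ih =>
    push_cast at hk
    have hnf : 0 ≤ (n : Int) * f := mul_nonneg (by positivity) (by omega)
    have hm : f < m := by nlinarith
    rw [subLoop, if_neg (by omega : ¬ (m = 1 ∧ f = 1)),
        if_neg (by omega : ¬ (m ≤ 0 ∨ f ≤ 0)), if_pos hm]
    have step : subLoop (g + 1) (m - f) f = subLoop (g + 1 + n) (m - f - n * f) f := by
      apply ih
      nlinarith
    rw [step]
    congr 1 <;> push_cast <;> ring

theorem subLoop_one (g f : Int) (hf : 1 ≤ f) : subLoop g 1 f = PySem.Int.toStr (g + f - 1) := by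
  rcases eq_or_lt_of_le hf with h | h
  · rw [← h, subLoop]; norm_num
  · rw [subLoop, if_neg (by omega : ¬ ((1:Int) = 1 ∧ f = 1)),
        if_neg (by omega : ¬ ((1:Int) ≤ 0 ∨ f ≤ 0)), if_neg (by omega : ¬ ((1:Int) > f)),
        subLoop_one (g + 1) (f - 1) (by omega)]
    congr 1; ring
termination_by (1 + f).toNat
decreasing_by omega

-- a state with a zero component (and the other ≥ 2) is "impossible"
theorem subLoop_zero_right (g m : Int) (hm : 2 ≤ m) : subLoop g m 0 = "impossible" := by
  rw [subLoop, if_neg (by omega : ¬ (m = 1 ∧ (0:Int) = 1)),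
      if_pos (by omega : m ≤ 0 ∨ (0:Int) ≤ 0)]

-- an equal pair ≥ 2 is "impossible"
theorem subLoop_diag (g m : Int) (hm : 2 ≤ m) : subLoop g m m = "impossible" := by
  rw [subLoop, if_neg (by omega : ¬ (m = 1 ∧ m = 1)),
      if_neg (by omega : ¬ (m ≤ 0 ∨ m ≤ 0)), if_neg (by omega : ¬ m > m), sub_self]
  exact subLoop_zero_right _ m hm

-- Port A equals the reference loop
theorem solutionLoop_eq_subLoop (g m f : Int) : solutionLoop g m f = subLoop g m f := by
  rw [solutionLoop]
  by_cases h1 : m = 1 ∧ f = 1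
  · rw [if_pos h1, subLoop, if_pos h1]
  · rw [if_neg h1]
    by_cases h2 : m ≤ 0 ∨ f ≤ 0
    · rw [if_pos h2, subLoop, if_neg h1, if_pos h2]
    · rw [if_neg h2]
      by_cases h3 : m > f
      · rw [if_pos h3]
        by_cases h4 : m > 5 * f
        · rw [if_pos h4]
          have hid := PySem.Int.floordiv_mul_add_mod m f
          have hr := PySem.Int.mod_nonneg m (show (0:ℤ) < f by omega)
          have hr2 := PySem.Int.mod_lt m (show (0:ℤ) < f by omega)
          have hq : 5 ≤ PySem.Int.floordiv m f := by
            rw [PySem.Int.le_floordiv_iff_mul_le (by omega)]; omega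
          set q := PySem.Int.floordiv m f with hqdef
          rw [solutionLoop_eq_subLoop (g + (q - 1)) (m - (q - 1) * f) f]
          have hc : ((q - 1).toNat : Int) = q - 1 := by omega
          have hb := subLoop_batch (q - 1).toNat g m f (by omega)
            (by rw [hc]; nlinarith)
          rw [hc] at hb
          exact hb.symm
        · rw [if_neg h4]
          conv_rhs => rw [subLoop, if_neg h1, if_neg h2, if_pos h3]
          exact solutionLoop_eq_subLoop (g + 1) (m - f) f
      · rw [if_neg h3]
        by_cases h4 : f > 5 * m
        · rw [if_pos h4]
          have hid := PySem.Int.floordiv_mul_add_mod f m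
          have hr := PySem.Int.mod_nonneg f (show (0:ℤ) < m by omega)
          have hr2 := PySem.Int.mod_lt f (show (0:ℤ) < m by omega)
          have hq : 5 ≤ PySem.Int.floordiv f m := by
            rw [PySem.Int.le_floordiv_iff_mul_le (by omega)]; omega
          set q := PySem.Int.floordiv f m with hqdef
          rw [solutionLoop_eq_subLoop (g + (q - 1)) m (f - (q - 1) * m),
              subLoop_swap (g + (q - 1)) m (f - (q - 1) * m), subLoop_swap g m f]
          have hc : ((q - 1).toNat : Int) = q - 1 := by omega
          have hb := subLoop_batch (q - 1).toNat g f m (by omega)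
            (by rw [hc]; nlinarith)
          rw [hc] at hb
          exact hb.symm
        · rw [if_neg h4]
          conv_rhs => rw [subLoop, if_neg h1, if_neg h2, if_neg h3]
          exact solutionLoop_eq_subLoop (g + 1) m (f - m)
termination_by (m + f).toNat
decreasing_by
  · have hid := PySem.Int.floordiv_mul_add_mod m f
    have hr := PySem.Int.mod_nonneg m (show (0:ℤ) < f by omega)
    have hr2 := PySem.Int.mod_lt m (show (0:ℤ) < f by omega)
    have hx : m - (PySem.Int.floordiv m f - 1) * f = f + PySem.Int.mod m f := by
      linear_combination -hid
    rw [hx]; omega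
  · omega
  · have hid := PySem.Int.floordiv_mul_add_mod f m
    have hr := PySem.Int.mod_nonneg f (show (0:ℤ) < m by omega)
    have hr2 := PySem.Int.mod_lt f (show (0:ℤ) < m by omega)
    have hx : f - (PySem.Int.floordiv f m - 1) * m = m + PySem.Int.mod f m := by
      linear_combination -hid
    rw [hx]; omega
  · omega

-- one doubling-batch step of B, measured against the reference loop:
-- from a normalized state M > F ≥ 2, subtracting (growStep M F 1).1 = j*F while
-- adding j generations agrees with j unit subtractions of subLoop
theorem altBatch (g M F : Int) (hF : 2 ≤ F) (hMF : F < M)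
    (ih : ∀ g', subLoop g' (M - (growStep M F 1).1) F
        = solutionAltLoop g' (M - (growStep M F 1).1) F) :
    subLoop g M F = solutionAltLoop (g + (growStep M F 1).2) (M - (growStep M F 1).1) F := by
  obtain ⟨hs1, hs2, hj1, hsj⟩ := growStep_bounds M F 1 F (by omega) (by omega) le_rfl (one_mul F).symm
  set s := (growStep M F 1).1 with hs
  set j := (growStep M F 1).2 with hjdef
  have hc : (j.toNat : Int) = j := by omega
  rcases eq_or_lt_of_le hs2 with heq | hlt
  · -- s = M : the pair collapses to (F, F) / (0, F); both sides are "impossible"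
    have hexp : (j - 1) * F = j * F - 1 * F := sub_mul j 1 F
    have hj2 : 2 ≤ j := by
      rcases eq_or_lt_of_le hj1 with h' | h'
      · rw [← h', one_mul] at hsj; omega
      · omega
    have hc' : ((j - 1).toNat : Int) = j - 1 := by omega
    have hb := subLoop_batch (j - 1).toNat g M F (by omega)
      (by rw [hc', hexp, one_mul]; omega)
    rw [hc'] at hb
    have hMF' : M - (j - 1) * F = F := by rw [hexp, one_mul]; omega
    rw [hb, hMF', subLoop_diag _ F hF]
    have hM0 : M - s = 0 := by omega
    rw [hM0, solutionAltLoop]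
    rw [dif_neg (by omega : ¬ ((0:Int) > 0 ∧ F > 0 ∧ (0:Int) ≠ F)),
        if_neg (by omega : ¬ ((0:Int) = 1 ∧ F = 1))]
  · -- s < M : a full batch of j subtractions, then the induction hypothesis
    have hb := subLoop_batch j.toNat g M F (by omega) (by rw [hc]; omega)
    rw [hc] at hb
    rw [hb, ← hsj, ih (g + j)]

-- Port B equals the reference loop
theorem solutionAltLoop_eq_subLoop (g m f : Int) : solutionAltLoop g m f = subLoop g m f := by
  rw [solutionAltLoop]
  by_cases h : m > 0 ∧ f > 0 ∧ m ≠ f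
  · rw [dif_pos h]
    by_cases hlt : m < f
    · simp only [if_pos hlt]
      by_cases hm1 : m = 1
      · rw [if_pos hm1, hm1, subLoop_one g f (by omega)]
      · rw [if_neg hm1, subLoop_swap g m f]
        exact (altBatch g f m (by omega) (by omega)
          (fun g' => (solutionAltLoop_eq_subLoop g' (f - (growStep f m 1).1) m).symm)).symm
    · simp only [if_neg hlt]
      by_cases hf1 : f = 1
      · rw [if_pos hf1, hf1, subLoop_swap g m 1, subLoop_one g m (by omega)]
      · rw [if_neg hf1]
        exact (altBatch g m f (by omega) (by omega)
          (fun g' => (solutionAltLoop_eq_subLoop g' (m - (growStep m f 1).1) f).symm)).symm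
  · rw [dif_neg h]
    by_cases h1 : m = 1 ∧ f = 1
    · rw [if_pos h1, subLoop, if_pos h1]
    · rw [if_neg h1]
      by_cases h2 : m ≤ 0 ∨ f ≤ 0
      · rw [subLoop, if_neg h1, if_pos h2]
      · -- both positive and not (1,1): the loop guard failed, so m = f ≥ 2
        have hmf : m = f := by omega
        have hm2 : 2 ≤ m := by omega
        rw [hmf, subLoop_diag g f (by omega)]
termination_by (m + f).toNat
decreasing_by
  · have hb := growStep_bounds f m 1 m (by omega) (by omega) le_rfl (one_mul m).symm
    have h1 := hb.1
    have h2 := hb.2.1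
    omega
  · have hb := growStep_bounds m f 1 f (by omega) (by omega) le_rfl (one_mul f).symm
    have h1 := hb.1
    have h2 := hb.2.1
    omega

-- ===== VERDICT (by name: the statement is the Claim_ definition above) =====
theorem solution_spec : Claim_equal_solution :=
  fun m f _ => (solutionLoop_eq_subLoop 0 m f).trans (solutionAltLoop_eq_subLoop 0 m f).symm
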